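-- pv_equiv track=rewrite | github.com/ncm2/ncm2 | pythonx/ncm2_matcher/substrfuzzy.py | get_abbrev
-- ===== SOURCE A (Python) =====
-- def get_abbrev(s):
--     res = []
--     if len(s) == 0:
--         return res
--     # always append 0 so that it should also detects prefix match
--     res.append(0)
--     for i in range(1, len(s)):
--         cp = s[i - 1]
--         c = s[i]
--         if not c.isalpha():
--             if c.isdecimal() and not cp.isdecimal():
--                 res.append(i)
--             continue
--         elif not cp.isalpha():
--             res.append(i)
--             continue
--         elif c.isupper() and not cp.isupper():
--             res.append(i)
--             continue
--         else:
--             continue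
--     return res
-- ===== SOURCE B (Python) =====
-- # B tokenizes the string by consuming maximal runs with a jumping cursor
-- # (digit runs, Upper...lower camel tokens, lowercase runs), then returns
-- # [0] plus the positive token-start offsets; same value as A's pairwise scan.
-- def get_abbrev(s):
--     n = len(s)
--     if n == 0:
--         return []
--     starts = []
--     i = 0
--     while i < n:
--         c = s[i]
--         if c.isdecimal():
--             starts.append(i)
--             i += 1
--             while i < n and s[i].isdecimal():
--                 i += 1
--         elif c.isalpha():
--             starts.append(i)
--             if c.isupper():
--                 i += 1
--                 while i < n and s[i].isalpha() and s[i].isupper():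
--                     i += 1
--             else:
--                 i += 1
--             while i < n and s[i].isalpha() and not s[i].isupper():
--                 i += 1
--         else:
--             i += 1
--     return [0] + [t for t in starts if t > 0]
-- ===== Notes on version B (the rewrite author's own statement) =====
-- stated objective: alternative
-- what changed: B replaces A's per-index scan that tests every adjacent character pair with a tokenizer: a cursor that consumes maximal runs (digit runs, Upper...lowercase camel tokens, lowercase runs) and records each token's start, returning [0] plus the positive token starts.
import Mathlib
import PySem

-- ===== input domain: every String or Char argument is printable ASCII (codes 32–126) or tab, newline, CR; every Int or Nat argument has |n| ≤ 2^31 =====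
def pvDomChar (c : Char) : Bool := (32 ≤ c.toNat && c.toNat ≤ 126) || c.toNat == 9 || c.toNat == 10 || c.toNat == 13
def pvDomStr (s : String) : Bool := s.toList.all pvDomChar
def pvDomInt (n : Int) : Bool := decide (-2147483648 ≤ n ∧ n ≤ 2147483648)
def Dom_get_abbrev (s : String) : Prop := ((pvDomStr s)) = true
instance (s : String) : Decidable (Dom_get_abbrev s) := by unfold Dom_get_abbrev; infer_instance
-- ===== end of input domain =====

-- B replaces A's adjacent-pair scan by a tokenizer that consumes maximal runs with a
-- jumping cursor and returns [0] plus the positive token-start offsets (objective: alternative).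
-- Python's str.isdecimal agrees with PySem.Chars.isdigit on the ASCII domain Dom_get_abbrev.

-- ===== PORT A =====
def get_abbrev (s : String) : List Int :=
  if (s.toList.length : Int) = 0 then []
  else
    (PySem.List.pyRange 1 (s.toList.length : Int) 1).foldl
      (fun res i =>
        let cp := PySem.List.pyGetD s.toList (i - 1) ' '   -- s[i-1]; index always in range here
        let c  := PySem.List.pyGetD s.toList i ' '         -- s[i];   index always in range here
        if !(PySem.Chars.isalpha c) then
          (if PySem.Chars.isdigit c && !(PySem.Chars.isdigit cp) then res ++ [i] else res)
        else if !(PySem.Chars.isalpha cp) then res ++ [i]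
        else if PySem.Chars.isupper c && !(PySem.Chars.isupper cp) then res ++ [i]
        else res)
      [0]

-- ===== PORT B =====
-- inner 'while i < n and <pred>(s[i]): i += 1' loops of Source B: consume a run, return rest + cursor
def pvSkip (p : Char → Bool) : List Char → Int → List Char × Int
  | [], i => ([], i)
  | c :: cs, i => if p c then pvSkip p cs (i + 1) else (c :: cs, i)

theorem pvSkip_len (p : Char → Bool) (cs : List Char) (i : Int) :
    (pvSkip p cs i).1.length ≤ cs.length := by
  induction cs generalizing i with
  | nil => simp [pvSkip]
  | cons c cs ih =>
    simp only [pvSkip]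
    split
    · exact Nat.le_succ_of_le (ih _)
    · exact Nat.le_refl _

-- the outer 'while i < n' loop of Source B, one token (or skipped char) per step
def pvScan : List Char → Int → List Int
  | [], _ => []
  | c :: cs, i =>
    if PySem.Chars.isdigit c then
      let r := pvSkip PySem.Chars.isdigit cs (i + 1)
      i :: pvScan r.1 r.2
    else if PySem.Chars.isalpha c then
      let r := if PySem.Chars.isupper c then
          pvSkip (fun x => PySem.Chars.isalpha x && PySem.Chars.isupper x) cs (i + 1)
        else (cs, i + 1)
      let r2 := pvSkip (fun x => PySem.Chars.isalpha x && !PySem.Chars.isupper x) r.1 r.2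
      i :: pvScan r2.1 r2.2
    else pvScan cs (i + 1)
  termination_by cs _ => cs.length
  decreasing_by
  · exact Nat.lt_succ_of_le (pvSkip_len _ _ _)
  · refine Nat.lt_succ_of_le (Nat.le_trans (pvSkip_len _ _ _) ?_)
    split
    · exact pvSkip_len _ _ _
    · exact Nat.le_refl _
  · exact Nat.lt_succ_of_le (Nat.le_refl _)

def get_abbrev_alt (s : String) : List Int :=
  if (s.toList.length : Int) = 0 then []
  else 0 :: (pvScan s.toList 0).filter (fun t => decide (0 < t))

-- ===== PRECONDITION & SPEC =====
def Spec_get_abbrev (s : String) (out : List Int) : Prop := out = get_abbrev_alt s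
instance (s : String) (out : List Int) : Decidable (Spec_get_abbrev s out) := by unfold Spec_get_abbrev; infer_instance

-- ===== CLAIM (what is proved, stated in full; the proofs are below) =====
def Claim_equal_get_abbrev : Prop := ∀ (s : String), Dom_get_abbrev s → Spec_get_abbrev s (get_abbrev s)

-- ===== LEMMAS AND PROOFS =====

-- character class: 0 = upper alpha, 1 = other alpha, 2 = decimal, 3 = other
def pvC (c : Char) : Int :=
  if PySem.Chars.isalpha c then (if PySem.Chars.isupper c then 0 else 1)
  else if PySem.Chars.isdigit c then 2 else 3

-- boundary predicate on (class of previous char, class of current char)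
def pvB (p q : Int) : Bool :=
  if q = 0 then decide (p ≠ 0)
  else if q = 1 then decide (p = 2 ∨ p = 3)
  else if q = 2 then decide (p ≠ 2)
  else false

-- A's inline branch condition on one adjacent pair, as a Bool
def pvCond (cp c : Char) : Bool :=
  if !(PySem.Chars.isalpha c) then (PySem.Chars.isdigit c && !(PySem.Chars.isdigit cp))
  else if !(PySem.Chars.isalpha cp) then true
  else (PySem.Chars.isupper c && !(PySem.Chars.isupper cp))

-- reference emitter: boundary indices of a suffix, given the previous char's class
def pvH (k : Int) : List Char → Int → List Int
  | [], _ => []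
  | c :: cs, i => (if pvB k (pvC c) then [i] else []) ++ pvH (pvC c) cs (i + 1)

-- a letter is never a digit (both are ASCII-range tests)
theorem pv_disj (c : Char) :
    ¬(PySem.Chars.isalpha c = true ∧ PySem.Chars.isdigit c = true) := by
  rintro ⟨h1, h2⟩
  simp only [PySem.Chars.isalpha, PySem.Chars.isupper, PySem.Chars.islower, PySem.Chars.isdigit,
    Bool.and_eq_true, Bool.or_eq_true, decide_eq_true_eq, Char.le_def,
    UInt32.le_iff_toNat_le] at h1 h2
  simp only [show 'A'.val.toNat = 65 from rfl, show 'Z'.val.toNat = 90 from rfl,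
    show 'a'.val.toNat = 97 from rfl, show 'z'.val.toNat = 122 from rfl,
    show '0'.val.toNat = 48 from rfl, show '9'.val.toNat = 57 from rfl] at h1 h2
  rcases h1 with ⟨ha, hb⟩ | ⟨ha, hb⟩ <;> omega

-- A's pair condition = the class-level boundary predicate
theorem pv_step (cp c : Char) : pvCond cp c = pvB (pvC cp) (pvC c) := by
  have hc := pv_disj c
  have hp := pv_disj cp
  simp only [pvCond, pvC]
  cases h1 : PySem.Chars.isalpha c <;> cases h2 : PySem.Chars.isalpha cp <;>
    cases h3 : PySem.Chars.isupper c <;> cases h4 : PySem.Chars.isupper cp <;>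
    cases h5 : PySem.Chars.isdigit c <;> cases h6 : PySem.Chars.isdigit cp <;>
    first
      | (exfalso; exact hc ⟨h1, h5⟩)
      | (exfalso; exact hp ⟨h2, h6⟩)
      | decide

theorem pvC_cases (c : Char) : pvC c = 0 ∨ pvC c = 1 ∨ pvC c = 2 ∨ pvC c = 3 := by
  unfold pvC; split_ifs <;> simp

-- the scanner (and its three mid-token states) emit exactly the reference boundaries
theorem pv_scan_h (cs : List Char) : ∀ (i : Int),
    pvScan cs i = pvH 3 cs i ∧
    (pvScan (pvSkip PySem.Chars.isdigit cs i).1 (pvSkip PySem.Chars.isdigit cs i).2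
      = pvH 2 cs i) ∧
    (pvScan (pvSkip (fun x => PySem.Chars.isalpha x && !PySem.Chars.isupper x) cs i).1
            (pvSkip (fun x => PySem.Chars.isalpha x && !PySem.Chars.isupper x) cs i).2
      = pvH 1 cs i) ∧
    ((let r := pvSkip (fun x => PySem.Chars.isalpha x && PySem.Chars.isupper x) cs i
      let r2 := pvSkip (fun x => PySem.Chars.isalpha x && !PySem.Chars.isupper x) r.1 r.2
      pvScan r2.1 r2.2) = pvH 0 cs i) := by
  induction cs with
  | nil => intro i; refine ⟨?_, ?_, ?_, ?_⟩ <;> simp [pvScan, pvSkip, pvH]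
  | cons c cs ih =>
    intro i
    have hd := pv_disj c
    have ha : pvScan (c :: cs) i = pvH 3 (c :: cs) i := by
      rw [pvScan]
      cases h1 : PySem.Chars.isdigit c
      · cases h2 : PySem.Chars.isalpha c
        · -- other char: skipped
          have hcls : pvC c = 3 := by simp [pvC, h1, h2]
          simp only [Bool.false_eq_true, if_false, pvH, hcls]
          simpa using (ih (i + 1)).1
        · cases h3 : PySem.Chars.isupper c
          · -- lowercase-style alpha token
            have hcls : pvC c = 1 := by simp [pvC, h2, h3]
            simp only [h1, h2, h3, Bool.false_eq_true, if_false, Bool.not_true, if_true,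
              pvH, hcls]
            have := (ih (i + 1)).2.2.1
            simp only [pvB]
            norm_num
            exact this
          · -- Upper camel token
            have hcls : pvC c = 0 := by simp [pvC, h2, h3]
            simp only [h1, h2, h3, Bool.false_eq_true, if_false, Bool.not_true, if_true,
              pvH, hcls]
            have := (ih (i + 1)).2.2.2
            simp only [pvB]
            norm_num
            exact this
      · -- digit token
        have h2 : PySem.Chars.isalpha c = false := by
          cases h2 : PySem.Chars.isalpha c
          · rfl
          · exact absurd ⟨h2, h1⟩ hd
        have hcls : pvC c = 2 := by simp [pvC, h1, h2]
        simp only [h1, pvH, hcls]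
        have := (ih (i + 1)).2.1
        simp only [pvB]
        norm_num
        exact this
    have hne2 : pvC c ≠ 2 → pvH 3 (c :: cs) i = pvH 2 (c :: cs) i := by
      intro h
      rcases pvC_cases c with h0 | h0 | h0 | h0 <;> simp [pvH, pvB, h0] at h ⊢
    have hb : pvScan (pvSkip PySem.Chars.isdigit (c :: cs) i).1
        (pvSkip PySem.Chars.isdigit (c :: cs) i).2 = pvH 2 (c :: cs) i := by
      rw [pvSkip]
      cases h1 : PySem.Chars.isdigit c
      · simp only [Bool.false_eq_true, if_false]
        have h2 : PySem.Chars.isalpha c = false ∨ PySem.Chars.isalpha c = true := by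
          cases PySem.Chars.isalpha c <;> simp
        have hcne : pvC c ≠ 2 := by
          rcases h2 with h2 | h2
          · simp [pvC, h1, h2]
          · simp [pvC, h2]; split_ifs <;> simp
        rw [← hne2 hcne]
        exact ha
      · have h2 : PySem.Chars.isalpha c = false := by
          cases h2 : PySem.Chars.isalpha c
          · rfl
          · exact absurd ⟨h2, h1⟩ hd
        have hcls : pvC c = 2 := by simp [pvC, h1, h2]
        simp only [if_true, pvH, hcls]
        have := (ih (i + 1)).2.1
        simp only [pvB]
        norm_num
        exact this
    have hcL : pvScan (pvSkip (fun x => PySem.Chars.isalpha x && !PySem.Chars.isupper x) (c :: cs) i).1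
        (pvSkip (fun x => PySem.Chars.isalpha x && !PySem.Chars.isupper x) (c :: cs) i).2
        = pvH 1 (c :: cs) i := by
      rw [pvSkip]
      cases hlp : (PySem.Chars.isalpha c && !PySem.Chars.isupper c)
      · simp only [Bool.false_eq_true, if_false]
        have hcne : pvC c ≠ 1 := by
          unfold pvC
          split_ifs with hA hU <;> first | omega | simp_all
        have heq : pvH 3 (c :: cs) i = pvH 1 (c :: cs) i := by
          rcases pvC_cases c with h0 | h0 | h0 | h0 <;>
            first | (exact absurd h0 hcne) | simp [pvH, pvB, h0]
        rw [← heq]; exact ha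
      · simp only [Bool.and_eq_true, Bool.not_eq_true'] at hlp
        have hcls : pvC c = 1 := by simp [pvC, hlp.1, hlp.2]
        simp only [if_true, pvH, hcls]
        have := (ih (i + 1)).2.2.1
        simp only [pvB]
        norm_num
        exact this
    have hcU : (let r := pvSkip (fun x => PySem.Chars.isalpha x && PySem.Chars.isupper x) (c :: cs) i
        let r2 := pvSkip (fun x => PySem.Chars.isalpha x && !PySem.Chars.isupper x) r.1 r.2
        pvScan r2.1 r2.2) = pvH 0 (c :: cs) i := by
      show pvScan _ _ = _
      rw [pvSkip]
      cases hup : (PySem.Chars.isalpha c && PySem.Chars.isupper c)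
      · simp only [Bool.false_eq_true, if_false]
        have hcne : pvC c ≠ 0 := by
          unfold pvC
          split_ifs with hA hU <;> first | omega | simp_all
        have heq : pvH 1 (c :: cs) i = pvH 0 (c :: cs) i := by
          rcases pvC_cases c with h0 | h0 | h0 | h0 <;>
            first | (exact absurd h0 hcne) | simp [pvH, pvB, h0]
        rw [← heq]; exact hcL
      · simp only [Bool.and_eq_true] at hup
        have hcls : pvC c = 0 := by simp [pvC, hup.1, hup.2]
        simp only [if_true, pvH, hcls]
        have := (ih (i + 1)).2.2.2
        simp only [pvB]
        norm_num
        exact this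
    exact ⟨ha, hb, hcL, hcU⟩

-- indexing an appended list at the length of its prefix
theorem pv_getD_app (pre : List Char) (y : Char) (ys : List Char) (d : Char) :
    PySem.List.pyGetD (pre ++ y :: ys) (pre.length : Int) d = y := by
  simp [PySem.List.pyGetD_natCast, List.getD]

-- A's filtered index range over the whole string = the reference emitter on the suffix
theorem pv_filt (tail : List Char) : ∀ (base : List Char) (prev : Char) (F : List Char),
    F = base ++ prev :: tail →
    (PySem.List.pyRange ((base.length : Int) + 1) ((F.length : Int)) 1).filter
      (fun j => pvCond (PySem.List.pyGetD F (j - 1) ' ') (PySem.List.pyGetD F j ' '))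
    = pvH (pvC prev) tail ((base.length : Int) + 1) := by
  induction tail with
  | nil =>
    intro base prev F hF
    have hlen : (F.length : Int) = (base.length : Int) + 1 := by subst hF; simp
    rw [hlen, PySem.List.pyRange_one_eq_nil (le_refl _)]
    rfl
  | cons c rest ih =>
    intro base prev F hF
    have hlen : (F.length : Int) = (base.length : Int) + 2 + rest.length := by
      subst hF; push_cast; simp; ring
    have hlt : (base.length : Int) + 1 < (F.length : Int) := by rw [hlen]; omega
    rw [PySem.List.pyRange_one_cons hlt, List.filter_cons]
    have hprev : PySem.List.pyGetD F ((base.length : Int) + 1 - 1) ' ' = prev := by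
      have : (base.length : Int) + 1 - 1 = (base.length : Int) := by ring
      rw [this, hF, pv_getD_app]
    have hcur : PySem.List.pyGetD F ((base.length : Int) + 1) ' ' = c := by
      have hF' : F = (base ++ [prev]) ++ c :: rest := by rw [hF]; simp
      have hl : ((base ++ [prev]).length : Int) = (base.length : Int) + 1 := by simp
      rw [hF', ← hl, pv_getD_app]
    have htail := ih (base ++ [prev]) c F (by rw [hF]; simp)
    have hl : ((base ++ [prev]).length : Int) + 1 = (base.length : Int) + 1 + 1 := by simp
    rw [hl] at htail
    rw [htail]
    simp only [hprev, hcur, pv_step]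
    cases h : pvB (pvC prev) (pvC c) <;> simp [pvH, h]

-- every index the reference emitter produces is ≥ its base index
theorem pv_ge (cs : List Char) : ∀ (k i : Int) (x : Int), x ∈ pvH k cs i → i ≤ x := by
  induction cs with
  | nil => intro k i x hx; simp [pvH] at hx
  | cons c cs ih =>
    intro k i x hx
    simp only [pvH, List.mem_append] at hx
    rcases hx with hx | hx
    · split at hx <;> simp_all
    · have := ih (pvC c) (i + 1) x hx; omega

theorem get_abbrev_eq_alt (s : String) : get_abbrev s = get_abbrev_alt s := by
  unfold get_abbrev get_abbrev_alt
  by_cases h : (s.toList.length : Int) = 0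
  · rw [if_pos h, if_pos h]
  · rw [if_neg h, if_neg h]
    have hne : s.toList ≠ [] := by
      intro hc; exact h (by rw [hc]; rfl)
    obtain ⟨c0, rest, hcs⟩ := List.exists_cons_of_ne_nil hne
    -- A side: fold of conditional appends → [0] ++ filtered range → reference emitter
    have hbody : ∀ i ∈ PySem.List.pyRange 1 (s.toList.length : Int) 1, ∀ acc : List Int,
        (let cp := PySem.List.pyGetD s.toList (i - 1) ' '
         let c  := PySem.List.pyGetD s.toList i ' '
         if !(PySem.Chars.isalpha c) then
           (if PySem.Chars.isdigit c && !(PySem.Chars.isdigit cp) then acc ++ [i] else acc)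
         else if !(PySem.Chars.isalpha cp) then acc ++ [i]
         else if PySem.Chars.isupper c && !(PySem.Chars.isupper cp) then acc ++ [i]
         else acc)
        = (if pvCond (PySem.List.pyGetD s.toList (i - 1) ' ') (PySem.List.pyGetD s.toList i ' ')
            then acc ++ [i] else acc) := by
      intro i _ acc
      simp only [pvCond]
      split_ifs <;> simp_all
    rw [PySem.List.foldl_congr_mem' _ _ _ _ hbody, PySem.List.foldl_append_if_eq_filter]
    have hfilt := pv_filt rest [] c0 s.toList (by rw [hcs]; rfl)
    simp only [List.length_nil, Nat.cast_zero, zero_add] at hfilt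
    rw [hfilt]
    -- B side: scanner → reference emitter at class 3, then drop the possible 0
    rw [hcs, (pv_scan_h (c0 :: rest) 0).1]
    simp only [pvH]
    rw [List.filter_append]
    have h1 : ((if pvB 3 (pvC c0) then [(0 : Int)] else []).filter
        (fun t => decide (0 < t))) = [] := by
      split <;> simp
    have h2 : (pvH (pvC c0) rest (0 + 1)).filter (fun t => decide (0 < t))
        = pvH (pvC c0) rest (0 + 1) := by
      refine List.filter_eq_self.mpr ?_
      intro x hx
      have := pv_ge rest (pvC c0) (0 + 1) x hx
      simp; omega
    rw [h1, h2]
    norm_num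

-- ===== VERDICT (by name: the statement is the Claim_ definition above) =====
theorem get_abbrev_spec : Claim_equal_get_abbrev := by
  intro s _
  exact get_abbrev_eq_alt s
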